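-- pv_equiv track=rewrite | github.com/Karlenkko/DD2424-project | utils.py | cleaning_with_space
-- ===== SOURCE A (Python) =====
-- def cleaning_with_space(text):
--     word_buffer = ''
--     delimiter = {'\n', ' ', '!', '$', '&', "'", ',', '-', '.', ':', ';', '?'}
--     filtered = []
--     for i in text:
--         if i in delimiter:
--             if word_buffer != '':
--                 filtered.append(word_buffer)
--             if i == "'":
--                 word_buffer = "'"
--             else:
--                 filtered.append(i)
--                 word_buffer = ''
--         else:
--             word_buffer += i
--     if word_buffer != '':
--         filtered.append(word_buffer)
--     return filtered
-- ===== SOURCE B (Python) =====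
-- _DELIMS = frozenset("\n !$&',-.:;?")
--
-- def cleaning_with_space(text):
--     # Run-based scanner: take maximal non-delimiter runs (an apostrophe seeds
--     # the following run), single non-apostrophe delimiters are their own tokens.
--     out = []
--     i, n = 0, len(text)
--     while i < n:
--         c = text[i]
--         if c == "'":
--             j = i + 1
--             while j < n and text[j] not in _DELIMS:
--                 j += 1
--             out.append(text[i:j])
--             i = j
--         elif c in _DELIMS:
--             out.append(c)
--             i += 1
--         else:
--             j = i + 1
--             while j < n and text[j] not in _DELIMS:
--                 j += 1
--             out.append(text[i:j])
--             i = j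
--     return out
-- ===== Notes on version B (the rewrite author's own statement) =====
-- stated objective: alternative
-- what changed: Replaces A's char-by-char state machine carrying a word buffer with a run-based scanner that emits one whole token per step by taking the maximal run of non-delimiters (seeded by an apostrophe when present) or a single delimiter.
import Mathlib
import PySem

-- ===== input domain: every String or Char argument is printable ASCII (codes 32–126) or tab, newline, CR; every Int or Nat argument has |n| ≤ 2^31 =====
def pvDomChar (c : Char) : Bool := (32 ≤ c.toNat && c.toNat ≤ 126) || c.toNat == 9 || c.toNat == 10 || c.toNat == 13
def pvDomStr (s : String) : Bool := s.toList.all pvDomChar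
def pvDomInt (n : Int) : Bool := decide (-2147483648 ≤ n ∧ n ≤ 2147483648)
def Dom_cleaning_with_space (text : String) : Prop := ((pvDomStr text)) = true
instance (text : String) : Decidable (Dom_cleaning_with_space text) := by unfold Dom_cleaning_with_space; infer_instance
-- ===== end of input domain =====

-- B replaces A's char-by-char buffer state machine by a run-based scanner
-- (maximal non-delimiter runs via takeWhile/dropWhile); objective: alternative.


-- the delimiter set literal of the Python (both versions use the same 12 characters)
def pvDelimSet : PySem.Set Char :=
  PySem.Set.ofList ['\n', ' ', '!', '$', '&', '\'', ',', '-', '.', ':', ';', '?']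

def pvIsDelim (c : Char) : Bool := PySem.Set.contains pvDelimSet c

-- ===== PORT A =====
-- one step of A's for-loop, over the state (word_buffer, filtered)
def pvStepA (s : List Char × List (List Char)) (i : Char) : List Char × List (List Char) :=
  let (wb, filtered) := s
  if pvIsDelim i then
    let filtered' := if wb ≠ [] then filtered ++ [wb] else filtered
    if i = '\'' then (['\''], filtered')
    else ([], filtered' ++ [[i]])
  else (wb ++ [i], filtered)

-- final flush of word_buffer
def pvFinishA (s : List Char × List (List Char)) : List (List Char) :=
  if s.1 ≠ [] then s.2 ++ [s.1] else s.2

def cleaning_with_space (text : String) : List String :=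
  (pvFinishA (text.toList.foldl pvStepA ([], []))).map String.ofList

-- ===== PORT B =====
-- B's while-loop: at each position emit a whole token and jump past it
def pvScanB : List Char → List (List Char)
  | [] => []
  | c :: rest =>
    if c = '\'' then
      ('\'' :: rest.takeWhile (fun x => !pvIsDelim x)) ::
        pvScanB (rest.dropWhile (fun x => !pvIsDelim x))
    else if pvIsDelim c then
      [c] :: pvScanB rest
    else
      (c :: rest.takeWhile (fun x => !pvIsDelim x)) ::
        pvScanB (rest.dropWhile (fun x => !pvIsDelim x))
  termination_by l => l.length
  decreasing_by
    · exact Nat.lt_succ_of_le (List.length_dropWhile_le _ _)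
    · exact Nat.lt_succ_of_le (Nat.le_refl _)
    · exact Nat.lt_succ_of_le (List.length_dropWhile_le _ _)

def cleaning_with_space_alt (text : String) : List String :=
  (pvScanB text.toList).map String.ofList

-- ===== PRECONDITION & SPEC =====
def Spec_cleaning_with_space (text : String) (out : List String) : Prop := out = cleaning_with_space_alt text
instance (text : String) (out : List String) : Decidable (Spec_cleaning_with_space text out) := by unfold Spec_cleaning_with_space; infer_instance

-- ===== CLAIM (what is proved, stated in full; the proofs are below) =====
def Claim_equal_cleaning_with_space : Prop := ∀ (text : String), Dom_cleaning_with_space text → Spec_cleaning_with_space text (cleaning_with_space text)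

-- ===== LEMMAS AND PROOFS =====

-- tokens A will eventually produce from the remaining input l, given pending buffer wb
def pvRest (wb : List Char) : List Char → List (List Char)
  | [] => if wb ≠ [] then [wb] else []
  | i :: l =>
    if pvIsDelim i then
      (if wb ≠ [] then [wb] else []) ++
        (if i = '\'' then pvRest ['\''] l else [i] :: pvRest [] l)
    else pvRest (wb ++ [i]) l

lemma pvFold_eq_rest (l : List Char) : ∀ (wb : List Char) (filtered : List (List Char)),
    pvFinishA (l.foldl pvStepA (wb, filtered)) = filtered ++ pvRest wb l := by
  induction l with
  | nil =>
    intro wb filtered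
    simp only [List.foldl_nil, pvRest, pvFinishA]
    split <;> simp
  | cons i l ih =>
    intro wb filtered
    simp only [List.foldl_cons, pvRest, pvStepA]
    by_cases hd : pvIsDelim i
    · by_cases ha : i = '\''
      · subst ha
        simp only [hd, if_true, ih]
        split <;> simp
      · simp only [hd, if_true, ha, ite_false, ih]
        split <;> simp
    · simp [hd, ih]

lemma pvRest_eq_scan (l : List Char) : ∀ (wb : List Char),
    pvRest wb l =
      if wb = [] then pvScanB l
      else (wb ++ l.takeWhile (fun x => !pvIsDelim x)) ::
             pvScanB (l.dropWhile (fun x => !pvIsDelim x)) := by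
  induction l with
  | nil =>
    intro wb
    by_cases h : wb = [] <;> simp [pvRest, pvScanB, h]
  | cons i l ih =>
    intro wb
    by_cases hd : pvIsDelim i
    · by_cases ha : i = '\''
      · subst ha
        have hdel : pvIsDelim '\'' = true := by decide
        by_cases h : wb = []
        · simp [pvRest, h, hdel, pvScanB, ih]
        · simp [pvRest, h, hdel, pvScanB, ih]
      · by_cases h : wb = []
        · simp [pvRest, h, hd, ha, pvScanB, ih]
        · simp [pvRest, h, hd, ha, pvScanB, ih, List.takeWhile, List.dropWhile]
    · by_cases h : wb = []
      · simp [pvRest, h, hd, ih, pvScanB]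
      · simp [pvRest, h, hd, ih, List.takeWhile, List.dropWhile]

-- ===== VERDICT (by name: the statement is the Claim_ definition above) =====
theorem cleaning_with_space_spec : Claim_equal_cleaning_with_space := by
  intro text _
  unfold Spec_cleaning_with_space cleaning_with_space cleaning_with_space_alt
  have h := pvFold_eq_rest text.toList [] []
  simp only [List.nil_append] at h
  rw [h, pvRest_eq_scan]
  simp
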